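-- pv_equiv track=rewrite | github.com/Turba2/system_analysis_tukhbatulinaa_bpm_22_po_2 | task1/task.py | build_indices
-- ===== SOURCE A (Python) =====
-- def build_indices(edges):
--     idx = {}
--     nodes = []
--     for u, v in edges:
--         if u not in idx:
--             idx[u] = len(nodes)
--             nodes.append(u)
--         if v not in idx:
--             idx[v] = len(nodes)
--             nodes.append(v)
--     return idx, nodes
-- ===== SOURCE B (Python) =====
-- def build_indices(edges):
--     xs = [x for e in edges for x in e]
--     nodes = [x for i, x in enumerate(xs) if x not in xs[:i]]
--     idx = {x: i for i, x in enumerate(nodes)}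
--     return idx, nodes
-- ===== Notes on version B (the rewrite author's own statement) =====
-- stated objective: alternative
-- what changed: B flattens the endpoints into one stream and selects first occurrences by a quadratic prefix-membership filter (keep xs[i] iff it is absent from xs[:i]); the index map is derived afterwards by enumerate, so no dict/list pair is grown during the walk.
import Mathlib
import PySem

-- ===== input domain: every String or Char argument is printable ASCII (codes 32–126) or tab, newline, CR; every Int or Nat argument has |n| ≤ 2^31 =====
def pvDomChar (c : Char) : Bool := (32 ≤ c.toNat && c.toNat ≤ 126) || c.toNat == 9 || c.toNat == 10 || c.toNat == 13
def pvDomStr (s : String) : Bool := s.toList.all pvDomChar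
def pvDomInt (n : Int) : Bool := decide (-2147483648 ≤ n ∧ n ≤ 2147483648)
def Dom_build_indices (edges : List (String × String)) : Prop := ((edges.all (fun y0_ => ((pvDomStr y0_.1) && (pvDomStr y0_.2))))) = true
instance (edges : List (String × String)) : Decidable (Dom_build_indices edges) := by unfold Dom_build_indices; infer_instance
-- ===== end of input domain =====

-- B flattens the endpoints and selects first occurrences by a prefix-membership filter (x kept iff absent from xs[:i]),
-- then derives the index map by enumerate; same return value as A (one loop growing dict and list together).

-- ===== PORT A =====
-- one iteration of A's for-loop body: try u, then v
def buildStep (st : PySem.Dict String Int × List String) (e : String × String) :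
    PySem.Dict String Int × List String :=
  let st1 := if st.1.contains e.1 then st
             else (st.1.insert e.1 (PySem.List.len st.2), st.2 ++ [e.1])
  if st1.1.contains e.2 then st1
  else (st1.1.insert e.2 (PySem.List.len st1.2), st1.2 ++ [e.2])

def build_indices (edges : List (String × String)) : (List (String × Int)) × List String :=
  let r := edges.foldl buildStep (PySem.Dict.empty, [])
  (r.1.items, r.2)

-- ===== PORT B =====
def build_indices_alt (edges : List (String × String)) : (List (String × Int)) × List String :=
  let xs := edges.flatMap (fun e => [e.1, e.2])
  let nodes := ((PySem.List.enumerate xs).filter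
      (fun p => !(PySem.List.slice xs none (some p.1)).contains p.2)).map (fun p => p.2)
  let idx := PySem.Dict.ofList ((PySem.List.enumerate nodes).map (fun p => (p.2, p.1)))
  (idx.items, nodes)

-- ===== PRECONDITION & SPEC =====
def Spec_build_indices (edges : List (String × String)) (out : (List (String × Int)) × List String) : Prop := out = build_indices_alt edges
instance (edges : List (String × String)) (out : (List (String × Int)) × List String) : Decidable (Spec_build_indices edges out) := by unfold Spec_build_indices; infer_instance

-- ===== CLAIM (what is proved, stated in full; the proofs are below) =====
def Claim_equal_build_indices : Prop := ∀ (edges : List (String × String)), Dom_build_indices edges → Spec_build_indices edges (build_indices edges)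

-- ===== LEMMAS AND PROOFS =====

-- the dict A maintains is always the enumeration of its node list
def enumD (ns : List String) : PySem.Dict String Int :=
  PySem.Dict.mk ((PySem.List.enumerate ns).map (fun p => (p.2, p.1)))

theorem any_snd_enumerate (ns : List String) (s : Int) (f : String → Bool) :
    (PySem.List.enumerate ns s).any (fun p => f p.2) = ns.any f := by
  induction ns generalizing s with
  | nil => rfl
  | cons x t ih => simp [PySem.List.enumerate, ih]

theorem contains_enumD (ns : List String) (x : String) :
    (enumD ns).contains x = ns.contains x := by
  simp only [enumD, PySem.Dict.contains_mk, List.any_map, Function.comp_def]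
  exact (any_snd_enumerate ns 0 (fun y => y == x)).trans (List.any_beq' ..)

theorem enumD_append (ns : List String) (x : String) (h : ns.contains x = false) :
    (enumD ns).insert x (PySem.List.len ns) = enumD (ns ++ [x]) := by
  apply PySem.Dict.ext
  rw [PySem.Dict.items_insert_of_not_contains _ _ (by rw [contains_enumD]; exact h)]
  simp [enumD, PySem.List.enumerate_append, PySem.List.len]

theorem loop_inv (edges : List (String × String)) (ns : List String) :
    edges.foldl buildStep (enumD ns, ns)
      = (enumD ((edges.flatMap (fun e => [e.1, e.2])).foldl PySem.Set.add ns),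
         (edges.flatMap (fun e => [e.1, e.2])).foldl PySem.Set.add ns) := by
  induction edges generalizing ns with
  | nil => rfl
  | cons e rest ih =>
    have hstep : buildStep (enumD ns, ns) e
        = (enumD (PySem.Set.add (PySem.Set.add ns e.1) e.2),
           PySem.Set.add (PySem.Set.add ns e.1) e.2) := by
      simp only [buildStep, contains_enumD, PySem.Set.add, PySem.Set.contains]
      by_cases h1 : e.1 ∈ ns
      · have c1 : ns.contains e.1 = true := by simpa using h1
        simp only [c1, if_true]
        by_cases h2 : e.2 ∈ ns
        · simp [contains_enumD, h2]
        · have c2 : ns.contains e.2 = false := by simpa using h2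
          simp only [contains_enumD, c2, Bool.false_eq_true, if_false]
          rw [enumD_append ns e.2 c2]
      · have c1 : ns.contains e.1 = false := by simpa using h1
        simp only [c1, Bool.false_eq_true, if_false]
        rw [show (enumD ns).insert e.1 (PySem.List.len ns) = enumD (ns ++ [e.1]) from
          enumD_append ns e.1 c1]
        by_cases h2 : e.2 ∈ ns ++ [e.1]
        · have h2' : e.2 ∈ ns ∨ e.2 = e.1 := by simpa using h2
          simp [contains_enumD, h2']
        · have c2 : (ns ++ [e.1]).contains e.2 = false := by simpa using h2
          have h2' : ¬ (e.2 ∈ ns ∨ e.2 = e.1) := by simpa using h2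
          simp only [contains_enumD, c2, Bool.false_eq_true, if_false]
          rw [enumD_append (ns ++ [e.1]) e.2 c2]
    simp only [List.foldl_cons, hstep, ih, List.flatMap_cons, List.foldl_append,
      List.foldl_cons, List.foldl_nil]

-- B's prefix-membership filter computes the keep-first dedup that A's loop maintains.
-- q = the consumed prefix of the stream, pre = the dedup state (same members as q).
theorem filter_firstOcc (xs q pre : List String) (h : ∀ y, q.contains y = pre.contains y) :
    pre ++ ((PySem.List.enumerate xs (q.length : Int)).filter
        (fun p => !(PySem.List.slice (q ++ xs) none (some p.1)).contains p.2)).map (fun p => p.2)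
      = xs.foldl PySem.Set.add pre := by
  induction xs generalizing q pre with
  | nil => simp [PySem.List.enumerate]
  | cons x t ih =>
    rw [PySem.List.enumerate_cons]
    have hsl : PySem.List.slice (q ++ x :: t) none (some (q.length : Int)) = q := by
      rw [PySem.List.slice_to_natCast]; simp
    have hq : ((q.length : Int) + 1) = (((q ++ [x]).length : Nat) : Int) := by
      simp
    have hrest : ∀ pre', (∀ y, (q ++ [x]).contains y = pre'.contains y) →
        pre' ++ ((PySem.List.enumerate t ((q.length : Int) + 1)).filter
          (fun p => !(PySem.List.slice (q ++ x :: t) none (some p.1)).contains p.2)).map (fun p => p.2)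
        = t.foldl PySem.Set.add pre' := by
      intro pre' h'
      have hsplit : q ++ x :: t = (q ++ [x]) ++ t := by simp
      rw [hsplit, hq]
      exact ih (q ++ [x]) pre' h'
    by_cases hx : x ∈ pre
    · have cx : q.contains x = true := by rw [h]; simpa using hx
      have h' : ∀ y, (q ++ [x]).contains y = pre.contains y := by
        intro y
        rcases eq_or_ne y x with rfl | hne
        · simp [hx]
        · simpa [hne] using h y
      simp only [List.filter_cons, hsl, cx, Bool.not_true, Bool.false_eq_true, if_false,
        List.foldl_cons]
      have hadd : PySem.Set.add pre x = pre := by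
        simp [PySem.Set.add, PySem.Set.contains, hx]
      rw [hadd]
      exact hrest pre h'
    · have cx : q.contains x = false := by rw [h]; simpa using hx
      have h' : ∀ y, (q ++ [x]).contains y = (pre ++ [x]).contains y := by
        intro y
        rcases eq_or_ne y x with rfl | hne
        · simp
        · simpa [hne] using h y
      simp only [List.filter_cons, hsl, cx, Bool.not_false, if_true, List.map_cons,
        List.foldl_cons]
      have hadd : PySem.Set.add pre x = pre ++ [x] := by
        simp [PySem.Set.add, PySem.Set.contains, hx]
      rw [hadd]
      have := hrest (pre ++ [x]) h'
      simpa using this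

theorem items_ofList_enum (ns : List String) (h : ns.Nodup) :
    (PySem.Dict.ofList ((PySem.List.enumerate ns).map (fun p => (p.2, p.1)))).items
      = (PySem.List.enumerate ns).map (fun p => (p.2, p.1)) := by
  have hkeys : (((PySem.List.enumerate ns).map (fun p => (p.2, p.1))).map Prod.fst).Nodup := by
    simpa [List.map_map, Function.comp_def] using
      (show (List.map (fun p : Int × String => p.2) (PySem.List.enumerate ns)).Nodup by
        rw [PySem.List.map_snd_enumerate]; exact h)
  have := PySem.Dict.items_foldl_insert_fresh
      ((PySem.List.enumerate ns).map (fun p => (p.2, p.1)))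
      Prod.fst Prod.snd PySem.Dict.empty
      (fun a _ => PySem.Dict.contains_empty a.1) hkeys
  simpa [PySem.Dict.ofList, PySem.Dict.update] using this

-- ===== VERDICT (by name: the statement is the Claim_ definition above) =====
theorem build_indices_spec : Claim_equal_build_indices := by
  intro edges _
  unfold Spec_build_indices build_indices build_indices_alt
  dsimp only
  have h0 : (PySem.Dict.empty : PySem.Dict String Int) = enumD [] := rfl
  rw [h0, loop_inv]
  have hf := filter_firstOcc (edges.flatMap (fun e => [e.1, e.2])) [] [] (fun _ => rfl)
  simp only [List.nil_append, List.length_nil, Nat.cast_zero] at hf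
  have hnodup : ((edges.flatMap (fun e => [e.1, e.2])).foldl PySem.Set.add []).Nodup := by
    rw [← PySem.Set.ofList_eq_foldl]
    exact PySem.Set.nodup_ofList _
  rw [hf, items_ofList_enum _ hnodup]
  rfl
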